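-- pv_equiv track=rewrite | github.com/sivaPalakurthi/quizzical | yagoFeatures2.py | changeToYagoFormat
-- ===== SOURCE A (Python) =====
-- def changeToYagoFormat(g):
--     g=g.strip()
--     g=g.replace("'","")
--     char = [c for c in g]
--     char[0] = char[0].upper()
--     prev = False
--     for i in range(0,len(g)):
--         if(prev == True):
--             char[i] = char[i].upper()
--             prev = False;
--         if(char[i]=="_"):
--             prev = True;
--     return "<"+"".join(char)+">"
-- ===== SOURCE B (Python) =====
-- def changeToYagoFormat(g):
--     g = g.strip().replace("'", "")
--     g = g[0].upper() + g[1:]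
--     parts = g.split('_')
--     out = parts[0] + "".join("_" + p[:1].upper() + p[1:] for p in parts[1:])
--     return "<" + out + ">"
-- ===== Notes on version B (the rewrite author's own statement) =====
-- stated objective: simpler
-- what changed: Replaces the char-by-char pass with a mutable list and a prev-underscore flag by uppercasing the first character and then splitting on the underscore character, uppercasing only the first character of each later segment, and rejoining.
import Mathlib
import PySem

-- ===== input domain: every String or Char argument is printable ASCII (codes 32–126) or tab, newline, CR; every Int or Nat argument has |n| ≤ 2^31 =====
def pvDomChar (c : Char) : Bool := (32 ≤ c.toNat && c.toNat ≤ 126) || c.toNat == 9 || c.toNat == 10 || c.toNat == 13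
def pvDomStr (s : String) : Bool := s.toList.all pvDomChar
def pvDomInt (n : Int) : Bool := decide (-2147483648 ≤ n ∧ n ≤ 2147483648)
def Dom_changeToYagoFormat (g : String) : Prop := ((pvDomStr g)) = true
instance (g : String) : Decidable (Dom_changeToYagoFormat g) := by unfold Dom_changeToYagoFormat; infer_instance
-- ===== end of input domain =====

-- B replaces A's char-by-char pass with a prev-underscore flag by a split-on-'_' /
-- uppercase-first-char-of-later-segments / rejoin decomposition (objective: simpler).


-- ===== PORT A =====
-- A's for-loop over range(0,len(g)) only reads/writes char[i] at step i and carries the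
-- flag 'prev'; its obvious structural recursion walks the list with the same flag.
-- The condition char[i]=="_" is tested on the (possibly uppercased) char[i], as in A.
def pvLoopA : List Char → Bool → List Char
  | [], _ => []
  | c :: cs, prev =>
    let c1 := if prev then PySem.Chars.upperChar c else c
    c1 :: pvLoopA cs (c1 == '_')

def changeToYagoFormat (g : String) : String :=
  let g1 := PySem.Str.strip g
  let g2 := PySem.Str.replace g1 "'" ""
  match g2.toList with
  | [] => ""   -- Python raises IndexError at char[0] here; excluded by Pre_
  | c :: cs =>
      String.ofList ('<' :: pvLoopA (PySem.Chars.upperChar c :: cs) false ++ ['>'])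

-- ===== PORT B =====
-- p[:1].upper() + p[1:]
def pvCapFirst : List Char → List Char
  | [] => []
  | c :: cs => PySem.Chars.upperChar c :: cs

-- Source B's g.split('_') (single-char separator) is ported as the corresponding Lean
-- library function List.splitOn '_', and '_'.join as List.intercalate ['_'].
def changeToYagoFormat_alt (g : String) : String :=
  let l := (PySem.Str.replace (PySem.Str.strip g) "'" "").toList
  let l1 : List Char :=
    match l with
    | [] => []   -- Python raises IndexError at g[0] here; excluded by Pre_
    | c :: cs => PySem.Chars.upperChar c :: cs   -- g[0].upper() + g[1:]
  let parts := List.splitOn '_' l1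
  let parts2 : List (List Char) :=
    match parts with
    | [] => []
    | p :: ps => p :: ps.map pvCapFirst
  String.ofList ('<' :: List.intercalate ['_'] parts2 ++ ['>'])

-- ===== PRECONDITION & SPEC =====
-- Pre_ excludes exactly the inputs on which A raises IndexError: those where the
-- stripped, apostrophe-free string is empty (char[0] does not exist).
def Pre_changeToYagoFormat (g : String) : Prop :=
  (PySem.Str.replace (PySem.Str.strip g) "'" "").toList ≠ []
instance (g : String) : Decidable (Pre_changeToYagoFormat g) := by
  unfold Pre_changeToYagoFormat; infer_instance
def pvWitness_changeToYagoFormat : String := "yago_test_entry"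

def Spec_changeToYagoFormat (g : String) (out : String) : Prop := out = changeToYagoFormat_alt g
instance (g : String) (out : String) : Decidable (Spec_changeToYagoFormat g out) := by unfold Spec_changeToYagoFormat; infer_instance

-- ===== CLAIM (what is proved, stated in full; the proofs are below) =====
def Claim_equal_changeToYagoFormat : Prop := ∀ (g : String), Dom_changeToYagoFormat g → Pre_changeToYagoFormat g → Spec_changeToYagoFormat g (changeToYagoFormat g)

-- ===== LEMMAS AND PROOFS =====

-- pvJoinB b parts: what B builds from the split parts; b = true means the head
-- segment is just after a '_' and gets its first char uppercased too.
def pvJoinB : Bool → List (List Char) → List Char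
  | true, parts => List.intercalate ['_'] (parts.map pvCapFirst)
  | false, [] => []
  | false, p :: ps => List.intercalate ['_'] (p :: ps.map pvCapFirst)

theorem pvUpperChar_ne_underscore {c : Char} (hc : c ≠ '_') : PySem.Chars.upperChar c ≠ '_' := by
  unfold PySem.Chars.upperChar
  split
  · rename_i hl
    unfold PySem.Chars.islower at hl
    simp only [Bool.and_eq_true, decide_eq_true_eq, Char.le_def,
      UInt32.le_iff_toNat_le] at hl
    have h1 : 97 ≤ c.toNat := hl.1
    have h2 : c.toNat ≤ 122 := hl.2
    intro h
    have hv : Nat.isValidChar (c.toNat - 32) := by left; omega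
    have h95 : (Char.ofNat (c.toNat - 32)).toNat = ('_' : Char).toNat := by rw [h]
    rw [show (Char.ofNat (c.toNat - 32)).toNat = c.toNat - 32 by
      simp [Char.ofNat, Char.ofNatAux, hv]] at h95
    have : ('_' : Char).toNat = 95 := by decide
    omega
  · exact hc
theorem pvIntercalate_cons_ne (s p : List Char) (ps : List (List Char)) (h : ps ≠ []) :
    List.intercalate s (p :: ps) = p ++ (s ++ List.intercalate s ps) := by
  cases ps with
  | nil => exact absurd rfl h
  | cons q qs => simp [List.intercalate, List.intersperse]

theorem pvCons_intercalate (a : Char) (p : List Char) (M : List (List Char)) :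
    List.intercalate ['_'] ((a :: p) :: M) = a :: List.intercalate ['_'] (p :: M) := by
  cases M with
  | nil => simp [List.intercalate, List.intersperse]
  | cons q qs =>
    rw [pvIntercalate_cons_ne ['_'] (a :: p) (q :: qs) (by simp),
        pvIntercalate_cons_ne ['_'] p (q :: qs) (by simp)]
    simp

theorem pvLoop_eq_joinB : ∀ (l : List Char) (b : Bool),
    pvLoopA l b = pvJoinB b (List.splitOn '_' l) := by
  intro l
  induction l with
  | nil =>
    intro b
    cases b <;> simp [pvLoopA, pvJoinB, List.splitOn, List.splitOnP, List.splitOnP.go,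
      pvCapFirst, List.intercalate]
  | cons c cs ih =>
    intro b
    have hne := List.splitOnP_ne_nil (fun x => x == '_') cs
    have hmapne : (List.splitOn '_' cs).map pvCapFirst ≠ [] := by
      simpa [List.splitOn] using hne
    by_cases hc : c = '_'
    · subst hc
      have huu : PySem.Chars.upperChar '_' = '_' := by decide
      have hsplit : List.splitOn '_' ('_' :: cs) = [] :: List.splitOn '_' cs := by
        simp [List.splitOn, List.splitOnP_cons]
      have hstep : pvLoopA ('_' :: cs) b = '_' :: pvLoopA cs true := by
        cases b <;> simp [pvLoopA, huu]
      rw [hstep, hsplit, ih true]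
      cases b <;>
        simp [pvJoinB, pvCapFirst, pvIntercalate_cons_ne _ _ _ hmapne]
    · have hbe : (c == '_') = false := by simpa using hc
      have hbe2 : (PySem.Chars.upperChar c == '_') = false := by
        simpa using pvUpperChar_ne_underscore hc
      have hsplit : List.splitOn '_' (c :: cs) =
          (List.splitOn '_' cs).modifyHead (List.cons c) := by
        simp [List.splitOn, List.splitOnP_cons, hc]
      obtain ⟨p, ps, hps⟩ : ∃ p ps, List.splitOn '_' cs = p :: ps := by
        cases h : List.splitOn '_' cs with
        | nil => exact absurd (by simpa [List.splitOn] using h) hne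
        | cons p ps => exact ⟨p, ps, rfl⟩
      have hloop : pvLoopA cs false = List.intercalate ['_'] (p :: ps.map pvCapFirst) := by
        rw [ih false, hps]; rfl
      rw [hsplit, hps]
      cases b with
      | false =>
        have hstep : pvLoopA (c :: cs) false = c :: pvLoopA cs false := by
          simp [pvLoopA, hbe]
        rw [hstep, hloop]
        simp only [List.modifyHead, pvJoinB, pvCons_intercalate]
      | true =>
        have hstep : pvLoopA (c :: cs) true = PySem.Chars.upperChar c :: pvLoopA cs false := by
          simp [pvLoopA, hbe2]
        rw [hstep, hloop]
        simp only [List.modifyHead, pvJoinB, List.map_cons, pvCapFirst, pvCons_intercalate]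

-- ===== VERDICT (by name: the statement is the Claim_ definition above) =====
theorem changeToYagoFormat_spec : Claim_equal_changeToYagoFormat := by
  intro g _ hpre
  unfold Spec_changeToYagoFormat changeToYagoFormat changeToYagoFormat_alt
  unfold Pre_changeToYagoFormat at hpre
  cases h : (PySem.Str.replace (PySem.Str.strip g) "'" "").toList with
  | nil => exact absurd h hpre
  | cons c cs =>
    simp only [h]
    rw [pvLoop_eq_joinB]
    cases hs : List.splitOn '_' (PySem.Chars.upperChar c :: cs) with
    | nil => exact absurd hs (List.splitOnP_ne_nil _ _)
    | cons p ps => simp [pvJoinB]
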